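-- pv_equiv track=rewrite | github.com/wojcikiewicz17/GAIA_phi | dados/RAFAELIA_TOROID_BITFLOW.py | binary_bitflow_for_den
-- ===== SOURCE A (Python) =====
-- from typing import Dict, List, Tuple
--
-- def binary_bitflow_for_den(den: int, n_bits: int = 256) -> str:
--     """
--     Generate a deterministic binary bitflow for a given denominator 'den',
--     using the binary expansion of 1/den up to n_bits bits.
--
--     Algorithm:
--       r = 1 % den
--       for i in range(n_bits):
--           r *= 2
--           if r >= den:
--               bit = '1'
--               r -= den
--           else:
--               bit = '0'
--
--     This avoids floating point and is reproducible across runs.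
--
--     Args:
--         den: positive integer denominator (den != 0).
--         n_bits: number of bits to generate.
--
--     Returns:
--         A string of '0'/'1' characters of length n_bits.
--
--     Error handling:
--         Raises ValueError if den <= 0 or n_bits <= 0.
--     """
--     if den <= 0:
--         raise ValueError("Denominator must be positive.")
--     if n_bits <= 0:
--         raise ValueError("Number of bits must be positive.")
--
--     r = 1 % den
--     bits: List[str] = []
--
--     for _ in range(n_bits):
--         r *= 2
--         if r >= den:
--             bits.append("1")
--             r -= den
--         else:
--             bits.append("0")
--
--     return "".join(bits)
-- ===== SOURCE B (Python) =====
-- def binary_bitflow_for_den(den: int, n_bits: int = 256) -> str: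
--     if den <= 0:
--         raise ValueError("Denominator must be positive.")
--     if n_bits <= 0:
--         raise ValueError("Number of bits must be positive.")
--     # One big-integer division: the first n_bits bits of 1/den are the
--     # binary digits of ((1 % den) << n_bits) // den, zero-padded to width n_bits.
--     q = ((1 % den) << n_bits) // den
--     return format(q, 'b').zfill(n_bits)
-- ===== Notes on version B (the rewrite author's own statement) =====
-- stated objective: faster
-- what changed: Replaced the n_bits-iteration long-division loop (one compare/subtract per bit, building a list of one-char strings) with a single big-integer computation q = ((1 % den) << n_bits) // den followed by binary formatting with zero-padding.
import Mathlib
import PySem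

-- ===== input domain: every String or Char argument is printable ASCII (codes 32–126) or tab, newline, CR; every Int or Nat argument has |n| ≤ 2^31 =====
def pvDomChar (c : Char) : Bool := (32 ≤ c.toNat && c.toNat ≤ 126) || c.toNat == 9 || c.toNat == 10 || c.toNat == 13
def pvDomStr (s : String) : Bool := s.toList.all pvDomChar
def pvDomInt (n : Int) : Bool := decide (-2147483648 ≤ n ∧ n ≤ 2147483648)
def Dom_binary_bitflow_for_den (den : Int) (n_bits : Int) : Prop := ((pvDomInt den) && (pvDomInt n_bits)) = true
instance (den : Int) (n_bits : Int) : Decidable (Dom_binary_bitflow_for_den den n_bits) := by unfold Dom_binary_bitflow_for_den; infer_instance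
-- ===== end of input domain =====

-- B replaces A's bit-by-bit long-division loop with one big-integer shift/division
-- plus binary formatting (objective: faster, by a constant-factor mechanism).

-- ===== PORT A =====
-- the 'for _ in range(n_bits)' loop: state (r, bits), one step per iteration
def pvALoop (den : Int) : Nat → Int → List String → Int × List String
  | 0, r, bits => (r, bits)
  | k+1, r, bits =>
    let r2 := r * 2
    if r2 ≥ den then pvALoop den k (r2 - den) (bits ++ ["1"])
    else pvALoop den k r2 (bits ++ ["0"])

def binary_bitflow_for_den (den : Int) (n_bits : Int) : String :=
  if den ≤ 0 then ""          -- Python raises ValueError here; excluded by Pre_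
  else if n_bits ≤ 0 then ""  -- Python raises ValueError here; excluded by Pre_
  else
    let r := PySem.Int.mod 1 den
    let res := pvALoop den n_bits.toNat r []
    PySem.Str.join "" res.2

-- ===== PORT B =====
def binary_bitflow_for_den_alt (den : Int) (n_bits : Int) : String :=
  if den ≤ 0 then ""          -- Python raises ValueError here; excluded by Pre_
  else if n_bits ≤ 0 then ""  -- Python raises ValueError here; excluded by Pre_
  else
    let q := PySem.Int.floordiv ((PySem.Int.mod 1 den) <<< n_bits.toNat) den
    PySem.Str.zfill (PySem.Int.toBin q) n_bits

-- ===== PRECONDITION & SPEC =====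
-- Pre_ excludes exactly the inputs on which the Python A raises ValueError (den <= 0 or n_bits <= 0).
def Pre_binary_bitflow_for_den (den : Int) (n_bits : Int) : Prop := 1 ≤ den ∧ 1 ≤ n_bits
instance (den : Int) (n_bits : Int) : Decidable (Pre_binary_bitflow_for_den den n_bits) := by unfold Pre_binary_bitflow_for_den; infer_instance
def pvWitness_binary_bitflow_for_den : Int × Int := (7, 10)

def Spec_binary_bitflow_for_den (den : Int) (n_bits : Int) (out : String) : Prop := out = binary_bitflow_for_den_alt den n_bits
instance (den : Int) (n_bits : Int) (out : String) : Decidable (Spec_binary_bitflow_for_den den n_bits out) := by unfold Spec_binary_bitflow_for_den; infer_instance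

-- ===== CLAIM (what is proved, stated in full; the proofs are below) =====
def Claim_equal_binary_bitflow_for_den : Prop := ∀ (den : Int) (n_bits : Int), Dom_binary_bitflow_for_den den n_bits → Pre_binary_bitflow_for_den den n_bits → Spec_binary_bitflow_for_den den n_bits (binary_bitflow_for_den den n_bits)

-- ===== LEMMAS AND PROOFS =====

-- width-n MSB-first binary digits of q (only the low n bits of q)
def pvFmt : Nat → Nat → List Char
  | 0, _ => []
  | n+1, q => Nat.digitChar (q / 2^n) :: pvFmt n (q % 2^n)

-- MSB-first binary digits of q, no leading zeros; pvBin 0 = []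
def pvBin : Nat → List Char
  | 0 => []
  | q+1 => pvBin ((q+1)/2) ++ [Nat.digitChar ((q+1) % 2)]
decreasing_by exact Nat.div_lt_self (Nat.succ_pos q) (by norm_num)

def pvBin' (q : Nat) : List Char := if q = 0 then ['0'] else pvBin q

theorem pvBin_eq (q : Nat) (h : q ≠ 0) : pvBin q = pvBin (q/2) ++ [Nat.digitChar (q % 2)] := by
  cases q with
  | zero => exact absurd rfl h
  | succ n => rw [pvBin]

theorem toDigitsCore_eq : ∀ (f q : Nat) (l : List Char), q < f →
    Nat.toDigitsCore 2 f q l = pvBin' q ++ l := by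
  intro f
  induction f with
  | zero => intro q l h; omega
  | succ f ih =>
    intro q l h
    rw [Nat.toDigitsCore]
    by_cases h2 : q / 2 = 0
    · have hq : q = 0 ∨ q = 1 := by omega
      rcases hq with rfl | rfl <;> simp [pvBin', pvBin, Nat.digitChar]
    · rw [if_neg h2, ih (q/2) _ (by omega)]
      have hq : q ≠ 0 := by omega
      simp [pvBin', hq, h2, pvBin_eq q hq]

theorem toDigits_eq (q : Nat) : Nat.toDigits 2 q = pvBin' q := by
  have := toDigitsCore_eq (q+1) q [] (Nat.lt_succ_self q)
  simpa [Nat.toDigits] using this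

theorem length_pvFmt (n q : Nat) : (pvFmt n q).length = n := by
  induction n generalizing q with
  | zero => rfl
  | succ n ih => simp [pvFmt, ih]

theorem pvFmt_succ_lsb (n q : Nat) (hq : q < 2^(n+1)) :
    pvFmt (n+1) q = pvFmt n (q/2) ++ [Nat.digitChar (q % 2)] := by
  induction n generalizing q with
  | zero =>
    have : q % 2 = q := Nat.mod_eq_of_lt (by simpa using hq)
    simp [pvFmt, this]
  | succ n ih =>
    have h1 : q / 2 ^ (n + 1) = (q / 2) / 2 ^ n := by
      rw [Nat.div_div_eq_div_mul, pow_succ']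
    have h2 : (q % 2 ^ (n + 1)) / 2 = (q / 2) % 2 ^ n := by
      rw [pow_succ', Nat.mod_mul_right_div_self]
    have h3 : (q % 2 ^ (n + 1)) % 2 = q % 2 :=
      Nat.mod_mod_of_dvd q (dvd_pow_self 2 (Nat.succ_ne_zero n))
    calc pvFmt (n+2) q
        = Nat.digitChar (q / 2^(n+1)) :: pvFmt (n+1) (q % 2^(n+1)) := rfl
      _ = Nat.digitChar (q / 2^(n+1)) :: (pvFmt n ((q % 2^(n+1))/2) ++ [Nat.digitChar ((q % 2^(n+1)) % 2)]) := by
            rw [ih _ (Nat.mod_lt _ (Nat.pow_pos (by norm_num)))]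
      _ = pvFmt (n+1) (q/2) ++ [Nat.digitChar (q % 2)] := by rw [h1, h2, h3]; rfl

theorem pvBin_msb : ∀ (n q : Nat), 2^n ≤ q → q < 2^(n+1) → pvBin q = pvFmt (n+1) q := by
  intro n
  induction n with
  | zero =>
    intro q h1 h2
    have hq : q = 1 := by simp at h1 h2; omega
    subst hq
    rw [pvBin_eq 1 one_ne_zero]
    simp [pvBin, pvFmt]
  | succ n ih =>
    intro q h1 h2
    have hp : 0 < 2^(n+1) := Nat.pow_pos (by norm_num)
    have hq0 : q ≠ 0 := by omega
    have hd1 : 2^n ≤ q/2 := (Nat.le_div_iff_mul_le (by norm_num)).mpr (by rw [← pow_succ]; exact h1)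
    have hd2 : q/2 < 2^(n+1) := (Nat.div_lt_iff_lt_mul (by norm_num)).mpr (by rw [← pow_succ]; exact h2)
    rw [pvBin_eq q hq0, pvFmt_succ_lsb (n+1) q h2, ih (q/2) hd1 hd2]

theorem pad_eq_pvFmt : ∀ (n : Nat), 1 ≤ n → ∀ (q : Nat), q < 2^n →
    List.replicate (n - (pvBin' q).length) '0' ++ pvBin' q = pvFmt n q := by
  intro n hn
  induction n, hn using Nat.le_induction with
  | base =>
    intro q hq
    have : q = 0 ∨ q = 1 := by simp at hq; omega
    rcases this with rfl | rfl
    · simp [pvBin', pvFmt]; decide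
    · rw [show pvBin' 1 = ['1'] from by rw [pvBin']; rw [if_neg one_ne_zero, pvBin_eq 1 one_ne_zero]; simp [pvBin]; decide]
      simp [pvFmt]; decide
  | succ n hn ih =>
    intro q hq
    by_cases h : q < 2^n
    · have heq := ih q h
      have hlen : (pvBin' q).length ≤ n := by
        have := congrArg List.length heq
        simp [length_pvFmt] at this
        omega
      have hdiv : q / 2^n = 0 := Nat.div_eq_of_lt h
      have hmod : q % 2^n = q := Nat.mod_eq_of_lt h
      show List.replicate (n + 1 - (pvBin' q).length) '0' ++ pvBin' q = pvFmt (n+1) q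
      rw [show n + 1 - (pvBin' q).length = (n - (pvBin' q).length) + 1 by omega,
          List.replicate_succ]
      simp only [pvFmt, hdiv, hmod, List.cons_append, heq]
      rfl
    · rw [Nat.not_lt] at h
      have hq0 : q ≠ 0 := by
        have : 0 < 2^n := Nat.pow_pos (by norm_num)
        omega
      have hb : pvBin' q = pvBin q := by rw [pvBin']; rw [if_neg hq0]
      have hmsb := pvBin_msb n q h hq
      have hlen : (pvBin q).length = n + 1 := by
        rw [hmsb, length_pvFmt]
      rw [hb, hlen, hmsb]
      simp

theorem pvBin_digits : ∀ (q : Nat), ∀ c ∈ pvBin q, c = '0' ∨ c = '1' := by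
  intro q
  induction q using Nat.strong_induction_on with
  | _ q ih =>
    intro c hc
    match q with
    | 0 => simp [pvBin] at hc
    | Nat.succ m =>
      rw [pvBin_eq (m+1) (Nat.succ_ne_zero m)] at hc
      rcases List.mem_append.mp hc with h | h
      · exact ih ((m+1)/2) (Nat.div_lt_self (Nat.succ_pos m) (by norm_num)) c h
      · have hm : (m+1) % 2 < 2 := Nat.mod_lt _ (by norm_num)
        interval_cases h2 : (m+1) % 2 <;> simp_all [Nat.digitChar]

theorem pvBin'_digits (q : Nat) : ∀ c ∈ pvBin' q, c = '0' ∨ c = '1' := by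
  intro c hc
  unfold pvBin' at hc
  split at hc
  · simp at hc; left; exact hc
  · exact pvBin_digits q c hc

theorem pvALoop_eq (den : Int) (hd : 1 ≤ den) :
    ∀ (n : Nat) (r : Int) (bits : List String), 0 ≤ r → r < den →
    (pvALoop den n r bits).2
      = bits ++ (pvFmt n ((r.toNat * 2^n) / den.toNat)).map (fun c => String.ofList [c]) := by
  intro n
  induction n with
  | zero => intro r bits _ _; simp [pvALoop, pvFmt]
  | succ n ih =>
    intro r bits hr0 hrd
    have hdpos : 0 < den.toNat := by omega
    have ht : r.toNat < den.toNat := by omega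
    have hpow : 0 < (2:Nat)^n := Nat.pow_pos (by norm_num)
    rw [pvALoop]
    by_cases hge : r * 2 ≥ den
    · rw [if_pos hge]
      have h0' : (0:Int) ≤ r * 2 - den := by omega
      have hlt' : r * 2 - den < den := by omega
      rw [ih (r * 2 - den) (bits ++ ["1"]) h0' hlt']
      have hu : (r * 2 - den).toNat = 2 * r.toNat - den.toNat := by omega
      have hud : den.toNat ≤ 2 * r.toNat := by omega
      have hkey : r.toNat * 2^(n+1) = den.toNat * 2^n + (2 * r.toNat - den.toNat) * 2^n := by
        have : r.toNat * 2^(n+1) = (2 * r.toNat) * 2^n := by ring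
        rw [this, ← Nat.add_mul]
        congr 1
        omega
      have hv : (2 * r.toNat - den.toNat) * 2^n / den.toNat < 2^n := by
        apply (Nat.div_lt_iff_lt_mul hdpos).mpr
        rw [mul_comm ((2:Nat)^n) den.toNat]
        exact (Nat.mul_lt_mul_right hpow).mpr (by omega)
      have hQ : r.toNat * 2^(n+1) / den.toNat
          = (2 * r.toNat - den.toNat) * 2^n / den.toNat + 2^n := by
        rw [hkey, Nat.mul_add_div hdpos]
        omega
      rw [hQ]
      rw [pvFmt]
      rw [Nat.add_div_right _ (Nat.pow_pos (by norm_num)), Nat.div_eq_of_lt hv,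
          Nat.add_mod_right, Nat.mod_eq_of_lt hv]
      simp [hu]
      rfl
    · rw [if_neg hge]
      have hlt' : r * 2 < den := by omega
      rw [ih (r * 2) (bits ++ ["0"]) (by omega) hlt']
      have hu : (r * 2).toNat = 2 * r.toNat := by omega
      have hQlt : 2 * r.toNat * 2^n / den.toNat < 2^n := by
        apply (Nat.div_lt_iff_lt_mul hdpos).mpr
        rw [mul_comm ((2:Nat)^n) den.toNat]
        exact (Nat.mul_lt_mul_right hpow).mpr (by omega)
      have hkey : r.toNat * 2^(n+1) = 2 * r.toNat * 2^n := by ring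
      rw [hkey, pvFmt, Nat.div_eq_of_lt hQlt, Nat.mod_eq_of_lt hQlt]
      simp [hu]
      rfl

theorem join_nilsep (l : List (List Char)) : PySem.Chars.join [] l = l.flatten := by
  simp only [PySem.Chars.join, List.intercalate]
  induction l with
  | nil => rfl
  | cons x xs ih =>
    cases xs with
    | nil => simp
    | cons y ys => simp_all [List.intersperse]

theorem join_singletons (cs : List Char) :
    PySem.Str.join "" (cs.map (fun c => String.ofList [c])) = String.ofList cs := by
  simp only [PySem.Str.join]
  congr 1
  rw [show ("" : String).toList = [] from rfl, join_nilsep]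
  induction cs with
  | nil => rfl
  | cons c cs ih => simp_all

theorem zfill_pad (m : Nat) (hm : 1 ≤ m) (Q : Nat) (hQ : Q < 2^m) :
    PySem.Chars.zfill (pvBin' Q) (m : Int) = pvFmt m Q := by
  have hpad := pad_eq_pvFmt m hm Q hQ
  have hdig := pvBin'_digits Q
  have hnn : pvBin' Q ≠ [] := by
    rw [pvBin']
    split
    · simp
    · next h => rw [pvBin_eq Q h]; simp
  obtain ⟨c, rest, hbq⟩ := List.exists_cons_of_ne_nil hnn
  have hc : c = '0' ∨ c = '1' := hdig c (by rw [hbq]; exact List.mem_cons_self ..)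
  rw [hbq] at hpad ⊢
  simp only [PySem.Chars.zfill]
  by_cases hle : (m : Int) ≤ (((c :: rest) : List Char).length : Int)
  · rw [if_pos hle]
    have hle' : m ≤ (c :: rest).length := by exact_mod_cast hle
    have : m - (c :: rest).length = 0 := by omega
    rw [this] at hpad
    simpa using hpad
  · rw [if_neg hle]
    have hsign : ¬ (c = '+' ∨ c = '-') := by rcases hc with rfl | rfl <;> simp
    simp only [hsign, if_false]
    simpa using hpad

-- ===== VERDICT (by name: the statement is the Claim_ definition above) =====
theorem binary_bitflow_for_den_spec : Claim_equal_binary_bitflow_for_den := by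
  intro den n_bits _ hpre
  obtain ⟨hd, hn⟩ := hpre
  unfold Spec_binary_bitflow_for_den binary_bitflow_for_den binary_bitflow_for_den_alt
  rw [if_neg (by omega), if_neg (by omega), if_neg (by omega), if_neg (by omega)]
  have hdpos : (0:Int) < den := by omega
  have h0 : 0 ≤ PySem.Int.mod 1 den := PySem.Int.mod_nonneg _ hdpos
  have h1 : PySem.Int.mod 1 den < den := PySem.Int.mod_lt _ hdpos
  have hm1 : 1 ≤ n_bits.toNat := by omega
  have htlt : (PySem.Int.mod 1 den).toNat < den.toNat := by omega
  have hQlt : (PySem.Int.mod 1 den).toNat * 2^n_bits.toNat / den.toNat < 2^n_bits.toNat := by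
    apply (Nat.div_lt_iff_lt_mul (by omega)).mpr
    rw [mul_comm ((2:Nat)^n_bits.toNat) den.toNat]
    exact (Nat.mul_lt_mul_right (Nat.pow_pos (by norm_num))).mpr htlt
  -- A side
  have hA : PySem.Str.join "" (pvALoop den n_bits.toNat (PySem.Int.mod 1 den) []).2
      = String.ofList (pvFmt n_bits.toNat ((PySem.Int.mod 1 den).toNat * 2^n_bits.toNat / den.toNat)) := by
    rw [pvALoop_eq den (by omega) n_bits.toNat (PySem.Int.mod 1 den) [] h0 h1]
    rw [List.nil_append, join_singletons]
  -- B side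
  have hfd : PySem.Int.floordiv ((PySem.Int.mod 1 den) <<< n_bits.toNat) den
      = (((PySem.Int.mod 1 den).toNat * 2^n_bits.toNat / den.toNat : Nat) : Int) := by
    rw [Int.shiftLeft_eq, PySem.Int.floordiv_eq_ediv_of_pos hdpos]
    have hcast : (((PySem.Int.mod 1 den).toNat * 2^n_bits.toNat / den.toNat : Nat) : Int)
        = ((PySem.Int.mod 1 den).toNat : Int) * 2^n_bits.toNat / (den.toNat : Int) := by
      push_cast; ring
    rw [hcast, Int.toNat_of_nonneg h0, Int.toNat_of_nonneg (by omega)]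
  have hB : PySem.Str.zfill (PySem.Int.toBin (PySem.Int.floordiv ((PySem.Int.mod 1 den) <<< n_bits.toNat) den)) n_bits
      = String.ofList (pvFmt n_bits.toNat ((PySem.Int.mod 1 den).toNat * 2^n_bits.toNat / den.toNat)) := by
    rw [hfd]
    rw [PySem.Str.zfill]
    have htb : (PySem.Int.toBin (((PySem.Int.mod 1 den).toNat * 2^n_bits.toNat / den.toNat : Nat) : Int)).toList
        = pvBin' ((PySem.Int.mod 1 den).toNat * 2^n_bits.toNat / den.toNat) := by
      rw [PySem.Int.toList_toBin, PySem.Int.toBinChars]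
      rw [if_neg (by exact not_lt.mpr (Int.natCast_nonneg _))]
      rw [Int.toNat_natCast, toDigits_eq]
    rw [htb]
    rw [show n_bits = ((n_bits.toNat : Nat) : Int) from (Int.toNat_of_nonneg (by omega)).symm]
    simp only [Int.toNat_natCast]
    rw [zfill_pad n_bits.toNat hm1 _ hQlt]
  rw [hA, hB]
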